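-- pv_equiv track=rewrite | github.com/wament/genomics | DNA Toolkit/Basic.py | gcContentSubset
-- ===== SOURCE A (Python) =====
-- def gcContent(seq):
--     return round((seq.count('C') + seq.count('G')) / len(seq) * 100)
--
-- def gcContentSubset(seq, k):
--     res = []
--
--
--     for i in range(0, len(seq) - k + 1, k):
--         subset = seq[i:i+k]
--         res.append(gcContent(subset))
--
--     if len(seq) % k != 0:
--         reverse_seq = seq[::-1]
--         rest_seq = reverse_seq[0 : (len(seq)%k)]
--         res.append(gcContent(rest_seq))
--     return res
-- ===== SOURCE B (Python) =====
-- def gcContentSubset(seq, k):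
--     # Prefix-count table: P[j] = number of 'C'/'G' in seq[:j]; each window GC
--     # count is then a table difference instead of a rescan of the window.
--     n = len(seq)
--     P = [0]
--     for ch in seq:
--         P.append(P[-1] + (ch == 'C' or ch == 'G'))
--     res = []
--     for i in range(0, n - k + 1, k):
--         res.append(round((P[i + k] - P[i]) / k * 100))
--     r = n % k
--     if r:
--         res.append(round((P[n] - P[n - r]) / r * 100))
--     return res
-- ===== Notes on version B (the rewrite author's own statement) =====
-- stated objective: alternative
-- what changed: B builds a prefix-count table of C/G in one pass and computes each window's GC count as a table difference, instead of slicing the string and rescanning every window (and reversing the whole string for the leftover).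
-- outside the precondition, e.g. on gcContentSubset('AC', -3): A returns [100], B raises IndexError; on gcContentSubset('ACG', -2): A returns [100], B raises IndexError
import Mathlib
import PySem

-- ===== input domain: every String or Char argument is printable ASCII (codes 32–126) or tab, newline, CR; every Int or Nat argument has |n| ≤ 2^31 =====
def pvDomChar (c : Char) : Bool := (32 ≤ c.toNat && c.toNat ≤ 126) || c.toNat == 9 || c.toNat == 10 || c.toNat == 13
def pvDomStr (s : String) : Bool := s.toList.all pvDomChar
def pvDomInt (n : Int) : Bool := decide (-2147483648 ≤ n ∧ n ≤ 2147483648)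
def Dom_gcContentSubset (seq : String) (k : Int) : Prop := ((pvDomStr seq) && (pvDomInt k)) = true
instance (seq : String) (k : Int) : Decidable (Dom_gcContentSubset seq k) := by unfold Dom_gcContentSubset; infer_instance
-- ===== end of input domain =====

-- B replaces A's per-window string slicing + rescans (and a full reversal for the
-- leftover) with one prefix-count table of C/G, each window GC being a table
-- difference (objective: alternative decomposition, same O(n) cost).

-- ===== shared Python-float primitive =====
-- Exact integer model of Python's round(g/n*100) for ints 0 ≤ g, 0 < n (both
-- Pythons evaluate this very expression): IEEE-754 double round-to-nearest-even
-- division g/n, then RN multiplication by 100, then round-half-even to int.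
-- PySem has no float support, so this is ported by hand; it is exact on
-- 0 ≤ g ≤ n ≤ 2^31 (checked against CPython exhaustively for small n and on
-- random large n).

-- one correctly-rounded step: floor(p*2^s/q) with remainder and divisor
def rnCore (p q : Nat) (s : Int) : Nat × Nat × Nat :=
  if 0 ≤ s then let N := p * 2 ^ s.toNat; (N / q, N % q, q)
  else let D := q * 2 ^ (-s).toNat; (p / D, p % D, D)

-- RN53(p/q) as (mantissa, binary exponent); p, q > 0
def rnd (p q : Nat) : Nat × Int :=
  let s0 : Int := 53 - (((PySem.Int.bitLength p : Nat) : Int) - ((PySem.Int.bitLength q : Nat) : Int))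
  let c0 := rnCore p q s0
  let sc := if c0.1 < 2 ^ 52 then (s0 + 1, rnCore p q (s0 + 1))
            else if 2 ^ 53 ≤ c0.1 then (s0 - 1, rnCore p q (s0 - 1)) else (s0, c0)
  let m0 := sc.2.1
  let r := sc.2.2.1
  let D := sc.2.2.2
  (if D < 2 * r ∨ (2 * r = D ∧ m0 % 2 = 1) then m0 + 1 else m0, -sc.1)

-- round(g/n*100) in Python float semantics
def pyRound100 (g n : Int) : Int :=
  let p := g.toNat
  let q := n.toNat
  if p = 0 then 0 else
  let x := rnd p q                 -- x = RN(g/n)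
  let y := rnd (x.1 * 100) 1       -- y = RN(x*100)
  let E := y.2 + x.2
  if 0 ≤ E then ((y.1 * 2 ^ E.toNat : Nat) : Int)
  else
    let D := 2 ^ (-E).toNat
    let q0 := y.1 / D
    let r := y.1 % D
    ((if D < 2 * r ∨ (2 * r = D ∧ q0 % 2 = 1) then q0 + 1 else q0 : Nat) : Int)

-- ===== PORT A =====
-- gcContent(seq): round((seq.count('C') + seq.count('G')) / len(seq) * 100)
def gcContentA (cs : List Char) : Int :=
  pyRound100 ((PySem.Chars.count cs ['C'] : Int) + (PySem.Chars.count cs ['G'] : Int)) (cs.length : Int)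

def gcContentSubset (seq : String) (k : Int) : List Int :=
  let cs := seq.toList
  let n : Int := (cs.length : Int)
  let res := (PySem.List.pyRange 0 (n - k + 1) k).foldl
    (fun res i => res ++ [gcContentA (PySem.List.slice cs (some i) (some (i + k)))]) []
  if PySem.Int.mod n k ≠ 0 then
    let reverseSeq := (PySem.List.slice? cs none none (-1)).getD []   -- seq[::-1]
    let restSeq := PySem.List.slice reverseSeq none (some (PySem.Int.mod n k))
    res ++ [gcContentA restSeq]
  else res

-- ===== PORT B =====
-- P = [0]; for ch in seq: P.append(P[-1] + (ch == 'C' or ch == 'G'))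
def prefixCG : List Char → Int → List Int
  | [], a => [a]
  | c :: cs, a => a :: prefixCG cs (a + (if c == 'C' || c == 'G' then 1 else 0))

def gcContentSubset_alt (seq : String) (k : Int) : List Int :=
  let cs := seq.toList
  let n : Int := (cs.length : Int)
  let P := prefixCG cs 0
  let res := (PySem.List.pyRange 0 (n - k + 1) k).foldl
    (fun res i => res ++ [pyRound100 (PySem.List.pyGetD P (i + k) 0 - PySem.List.pyGetD P i 0) k]) []
  let r := PySem.Int.mod n k
  if r ≠ 0 then
    res ++ [pyRound100 (PySem.List.pyGetD P n 0 - PySem.List.pyGetD P (n - r) 0) r]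
  else res

-- ===== PRECONDITION & SPEC =====
-- Pre_ admits every positive window size, plus the k < 0 inputs where the leftover
-- branch is skipped (k divides the length; there both programs return the empty
-- window list of the empty negative-step range). Excluded: k = 0, where A raises
-- ValueError (zero range step), and the remaining k < 0 inputs, where A's value is
-- an artefact of a negative-modulo slice of the reversed string (outside the
-- natural domain of a window size) and B raises IndexError.
def Pre_gcContentSubset (seq : String) (k : Int) : Prop :=
  0 < k ∨ (k < 0 ∧ PySem.Int.mod ((seq.toList.length : Nat) : Int) k = 0)
instance (seq : String) (k : Int) : Decidable (Pre_gcContentSubset seq k) := by unfold Pre_gcContentSubset; infer_instance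
def pvWitness_gcContentSubset : String × Int := ("ACGTC", 2)

def Spec_gcContentSubset (seq : String) (k : Int) (out : List Int) : Prop := out = gcContentSubset_alt seq k
instance (seq : String) (k : Int) (out : List Int) : Decidable (Spec_gcContentSubset seq k out) := by unfold Spec_gcContentSubset; infer_instance

-- ===== CLAIM (what is proved, stated in full; the proofs are below) =====
def Claim_equal_gcContentSubset : Prop := ∀ (seq : String) (k : Int), Dom_gcContentSubset seq k → Pre_gcContentSubset seq k → Spec_gcContentSubset seq k (gcContentSubset seq k)

-- ===== LEMMAS AND PROOFS (the VERDICT theorem gcContentSubset_spec closes the file) =====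

-- single-character s.count(c) is the list count
theorem charsCount_go_singleton (c : Char) : ∀ (fuel : Nat) (l : List Char) (acc : Nat),
    l.length ≤ fuel → PySem.Chars.count.go [c] fuel l acc = acc + l.count c := by
  intro fuel
  induction fuel with
  | zero => intro l acc h; cases l with
    | nil => simp [PySem.Chars.count.go]
    | cons x t => simp at h
  | succ f ih =>
    intro l acc h
    cases l with
    | nil => simp [PySem.Chars.count.go]
    | cons x t =>
      simp only [PySem.Chars.count.go, List.isPrefixOf, List.length_cons] at *
      by_cases hx : c == x
      · simp only [hx, Bool.true_and, if_pos]
        simp only [List.length_nil, Nat.zero_add, List.drop_succ_cons, List.drop_zero]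
        rw [ih t (acc + 1) (by omega)]
        have : x = c := (beq_iff_eq.mp hx).symm
        simp [this]
        omega
      · rw [if_neg (by simpa using hx), ih t acc (by omega)]
        have hxc : ¬ (x == c) = true := by
          simp at hx ⊢; exact fun e => hx e.symm
        simp [List.count_cons, hxc]

theorem charsCount_singleton (l : List Char) (c : Char) :
    PySem.Chars.count l [c] = l.count c := by
  simp only [PySem.Chars.count, List.isEmpty_cons]
  exact (charsCount_go_singleton c l.length l 0 le_rfl).trans (by omega)

def cgCount (l : List Char) : Nat := l.count 'C' + l.count 'G'

-- the prefix table reads back the prefix C/G counts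
theorem prefixCG_getD : ∀ (cs : List Char) (a : Int) (j : Nat), j ≤ cs.length →
    (prefixCG cs a).getD j 0 = a + (cgCount (cs.take j) : Int) := by
  intro cs
  induction cs with
  | nil =>
    intro a j h
    have hj : j = 0 := Nat.le_zero.mp h
    subst hj; simp [prefixCG, cgCount]
  | cons c t ih =>
    intro a j h
    cases j with
    | zero => simp [prefixCG, cgCount]
    | succ j =>
      simp only [prefixCG, List.getD_cons_succ, List.take_succ_cons]
      rw [ih _ j (by simpa using h)]
      have : (cgCount (c :: t.take j) : Int) = (if c == 'C' || c == 'G' then 1 else 0) + cgCount (t.take j) := by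
        by_cases hC : c = 'C'
        · subst hC; simp [cgCount]; ring
        · by_cases hG : c = 'G'
          · subst hG; simp [cgCount]; ring
          · simp [cgCount, hC, hG]
      rw [this]; ring

-- getD through pyGetD at a Nat index inside the table
theorem prefixCG_pyGetD (cs : List Char) (j : Nat) (hj : j ≤ cs.length) :
    PySem.List.pyGetD (prefixCG cs 0) ((j : Nat) : Int) 0 = (cgCount (cs.take j) : Int) := by
  rw [PySem.List.pyGetD_natCast]
  simpa using prefixCG_getD cs 0 j hj

-- window C/G count as a prefix difference
theorem cgCount_window (cs : List Char) (j m : Nat) :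
    (cgCount (cs.take (j + m)) : Int) - (cgCount (cs.take j) : Int)
      = (cgCount ((cs.drop j).take m) : Int) := by
  rw [List.take_add]
  simp [cgCount]
  ring

theorem pyRange_neg_step_nil (b k : Int) (hb : 0 ≤ b) (hk : k < 0) :
    PySem.List.pyRange 0 b k = [] := by
  simp [PySem.List.pyRange, hk.ne, not_lt.mpr (le_of_lt hk), not_lt.mpr hb]

theorem gcContentSubset_spec : Claim_equal_gcContentSubset := by
  intro seq k _ hpre
  unfold Spec_gcContentSubset gcContentSubset gcContentSubset_alt
  simp only [PySem.List.foldl_append_singleton_eq_map, List.nil_append]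
  rcases hpre with hk | ⟨hneg, hmod0⟩
  case inr =>
    -- k < 0 dividing the length: the range is empty and the leftover branch is off
    rw [pyRange_neg_step_nil _ k (by omega) hneg, hmod0]
    simp
  set cs := seq.toList with hcs
  set n : Nat := cs.length with hn
  have hkn : k = ((k.toNat : Nat) : Int) := (Int.toNat_of_nonneg (le_of_lt hk)).symm
  have hmod : PySem.Int.mod (n : Int) k = ((n % k.toNat : Nat) : Int) := by
    rw [hkn]; exact PySem.Int.mod_natCast n k.toNat
  -- the two window maps agree pointwise on the range
  have hmap : (PySem.List.pyRange 0 ((n : Int) - k + 1) k).map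
        (fun i => gcContentA (PySem.List.slice cs (some i) (some (i + k))))
      = (PySem.List.pyRange 0 ((n : Int) - k + 1) k).map
        (fun i => pyRound100 (PySem.List.pyGetD (prefixCG cs 0) (i + k) 0 - PySem.List.pyGetD (prefixCG cs 0) i 0) k) := by
    apply List.map_congr_left
    intro i hi
    rcases (PySem.List.mem_pyRange_iff_of_pos hk i).mp hi with ⟨h0, hlt, -⟩
    have hik : i + k ≤ (n : Int) := by omega
    have hj : i = ((i.toNat : Nat) : Int) := (Int.toNat_of_nonneg h0).symm
    set j : Nat := i.toNat with hjdef
    have hjk : j + k.toNat ≤ n := by omega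
    have hslice : PySem.List.slice cs (some i) (some (i + k)) = (cs.drop j).take k.toNat := by
      rw [PySem.List.slice_toNat cs h0 (by omega)]
      congr 1
      omega
    have hlen : ((cs.drop j).take k.toNat).length = k.toNat := by
      simp
      omega
    have hipk : i + k = (((j + k.toNat : Nat) : Nat) : Int) := by push_cast; omega
    rw [hslice, hipk, hj, prefixCG_pyGetD cs (j + k.toNat) hjk, prefixCG_pyGetD cs j (by omega),
      cgCount_window cs j k.toNat]
    unfold gcContentA
    rw [charsCount_singleton, charsCount_singleton, hlen]
    have : ((cs.drop j).take k.toNat).count 'C' + ((cs.drop j).take k.toNat).count 'G'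
        = cgCount ((cs.drop j).take k.toNat) := rfl
    push_cast [← this]
    rw [← hkn]
  rw [hmap]
  -- leftover arm
  by_cases hr : PySem.Int.mod (n : Int) k ≠ 0
  · simp only [if_pos hr]
    congr 1
    set r : Nat := n % k.toNat with hrdef
    have hr' : PySem.Int.mod (n : Int) k = ((r : Nat) : Int) := hmod
    have hrn : r ≤ n := Nat.mod_le _ _
    have hrev : (PySem.List.slice? cs none none (-1)).getD [] = cs.reverse := by
      rw [PySem.List.slice?_none_none_neg_one]; rfl
    have hrest : PySem.List.slice cs.reverse none (some (PySem.Int.mod (n : Int) k))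
        = (cs.drop (n - r)).reverse := by
      rw [hr', PySem.List.slice_to cs.reverse (by positivity)]
      rw [Int.toNat_natCast, List.take_reverse]
    have hnr : (n : Int) - PySem.Int.mod (n : Int) k = (((n - r : Nat) : Nat) : Int) := by
      rw [hr']; omega
    rw [hrev, hrest, hnr, prefixCG_pyGetD cs (n - r) (by omega)]
    have hP : PySem.List.pyGetD (prefixCG cs 0) ((n : Nat) : Int) 0 = (cgCount (cs.take n) : Int) :=
      prefixCG_pyGetD cs n le_rfl
    rw [hP]
    have htake : cs.take n = cs := by simp [← hn]
    rw [htake]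
    have hsplit : (cgCount cs : Int) - (cgCount (cs.take (n - r)) : Int)
        = (cgCount ((cs.drop (n - r)).take r) : Int) := by
      have := cgCount_window cs (n - r) r
      rwa [Nat.sub_add_cancel hrn, htake] at this
    have htk : (cs.drop (n - r)).take r = cs.drop (n - r) := by
      apply List.take_of_length_le
      simp [← hn]
      omega
    rw [hsplit, htk]
    unfold gcContentA
    rw [charsCount_singleton, charsCount_singleton]
    have hlenrev : ((cs.drop (n - r)).reverse.length : Int) = PySem.Int.mod (n : Int) k := by
      rw [hr']
      simp [← hn]
      omega
    rw [hlenrev]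
    have : (cs.drop (n - r)).reverse.count 'C' + (cs.drop (n - r)).reverse.count 'G'
        = cgCount (cs.drop (n - r)) := by simp [cgCount]
    push_cast [← this]
    ring_nf
  · simp only [if_neg hr]
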